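-- pv_equiv track=rewrite | github.com/tgesli/algofun | fastbloku/days.py | dayRange
-- ===== SOURCE A (Python) =====
-- def dayRange(days):
--     dayNames = ["Sun", "M", "Tu", "W", "Th", "F", "Sat"]
--
--     if not days:
--         return ""
--
--     segments = []
--     last = 0
--     for i in range(len(days)-1):
--         if days[i + 1] - days[i] > 1:
--             segments.append(days[last:i + 1])
--             last = i+1
--
--     segments.append(days[last:])
--
--     res = ""
--     delim = ""
--     for seg in segments:
--         if len(seg) > 1:
--             res += delim + dayNames[seg[0]] + '-' + dayNames[seg[-1]]
--         else:
--             res += delim + dayNames[seg[0]]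
--         delim = ","
--
--     return res
-- ===== SOURCE B (Python) =====
-- def dayRange(days):
--     dayNames = ["Sun", "M", "Tu", "W", "Th", "F", "Sat"]
--
--     if not days:
--         return ""
--
--     def fmt(start, end, multi):
--         return dayNames[start] + '-' + dayNames[end] if multi else dayNames[start]
--
--     # Walk the list right-to-left, building the output back-to-front.
--     # Only scalars are kept: the value ending the current run and whether the
--     # run has more than one element.  Every run emitted inside the loop has a
--     # neighbour run to its left, so its comma is unconditional.
--     res = ""
--     end = days[-1]
--     multi = False
--     for i in range(len(days) - 1, 0, -1):
--         if days[i] - days[i - 1] > 1: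
--             res = "," + fmt(days[i], end, multi) + res
--             end = days[i - 1]
--             multi = False
--         else:
--             multi = True
--     return fmt(days[0], end, multi) + res
-- ===== Notes on version B (the rewrite author's own statement) =====
-- stated objective: alternative
-- what changed: B traverses the list right-to-left in a single pass with only scalar state (the current run's end value and a length>1 flag), building the output string back-to-front by prepending each finished run with an unconditional comma, instead of A's two forward passes that first collect a list of slice segments and then render them left-to-right with a delimiter accumulator.
import Mathlib
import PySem

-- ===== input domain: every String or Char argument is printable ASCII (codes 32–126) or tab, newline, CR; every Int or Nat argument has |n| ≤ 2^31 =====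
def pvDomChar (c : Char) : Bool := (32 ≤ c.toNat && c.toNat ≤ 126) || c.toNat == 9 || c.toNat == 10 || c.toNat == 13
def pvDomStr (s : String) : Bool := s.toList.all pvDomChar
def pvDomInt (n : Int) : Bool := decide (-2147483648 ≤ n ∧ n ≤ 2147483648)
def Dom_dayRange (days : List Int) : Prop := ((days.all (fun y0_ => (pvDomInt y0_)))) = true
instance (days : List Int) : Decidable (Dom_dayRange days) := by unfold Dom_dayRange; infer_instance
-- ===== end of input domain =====

-- B replaces A's two forward passes (collect slice segments, then render them with a delimiter
-- accumulator) by ONE right-to-left pass over scalar state that builds the string back-to-front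
-- (objective: alternative — same O(n) cost, different traversal and data representation).

-- ===== PORT A =====
def pvDayNames : List String := ["Sun", "M", "Tu", "W", "Th", "F", "Sat"]

def dayRange (days : List Int) : String :=
  if days = [] then "" else
    -- first loop: collect segments (a list of slices of days) and the running 'last'
    let st :=
      (PySem.List.pyRange 0 ((days.length : Int) - 1) 1).foldl
        (fun (st : List (List Int) × Int) i =>
          if PySem.List.pyGetD days (i + 1) 0 - PySem.List.pyGetD days i 0 > 1 then
            (st.1 ++ [PySem.List.slice days (some st.2) (some (i + 1))], i + 1)
          else st)
        ([], 0)
    let segments := st.1 ++ [PySem.List.slice days (some st.2) none]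
    -- second loop: render each segment, with a delimiter accumulator
    (segments.foldl
        (fun (st : String × String) seg =>
          if seg.length > 1 then
            (st.1 ++ (st.2 ++ PySem.List.pyGetD pvDayNames (PySem.List.pyGetD seg 0 0) "" ++ "-"
                           ++ PySem.List.pyGetD pvDayNames (PySem.List.pyGetD seg (-1) 0) ""), ",")
          else
            (st.1 ++ (st.2 ++ PySem.List.pyGetD pvDayNames (PySem.List.pyGetD seg 0 0) ""), ","))
        ("", "")).1

-- ===== PORT B =====
-- helper 'fmt' of Source B: render a run from its start value, end value and length>1 flag
def pvFmt (start endv : Int) (multi : Bool) : String :=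
  if multi then
    PySem.List.pyGetD pvDayNames start "" ++ "-" ++ PySem.List.pyGetD pvDayNames endv ""
  else PySem.List.pyGetD pvDayNames start ""

def dayRange_alt (days : List Int) : String :=
  if days = [] then "" else
    -- right-to-left pass: state = (string built so far, current run's end value, length>1 flag)
    let st :=
      (PySem.List.pyRange ((days.length : Int) - 1) 0 (-1)).foldl
        (fun (st : String × Int × Bool) i =>
          if PySem.List.pyGetD days i 0 - PySem.List.pyGetD days (i - 1) 0 > 1 then
            ("," ++ pvFmt (PySem.List.pyGetD days i 0) st.2.1 st.2.2 ++ st.1,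
             PySem.List.pyGetD days (i - 1) 0, false)
          else (st.1, st.2.1, true))
        ("", PySem.List.pyGetD days (-1) 0, false)
    pvFmt (PySem.List.pyGetD days 0 0) st.2.1 st.2.2 ++ st.1

-- ===== PRECONDITION & SPEC =====
-- Pre_ excludes exactly the inputs where A raises IndexError: some element that starts or
-- ends a consecutive run (and hence is used to index the 7-name table) lies outside the interval from -7 to 6.
def Pre_dayRange (days : List Int) : Prop :=
  ∀ i : Fin days.length,
    ((i.1 = 0 ∨ days.getD (i.1 - 1) 0 + 1 < days.getD i.1 0) ∨
     (i.1 + 1 = days.length ∨ days.getD i.1 0 + 1 < days.getD (i.1 + 1) 0)) →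
    -7 ≤ days.getD i.1 0 ∧ days.getD i.1 0 ≤ 6

instance (days : List Int) : Decidable (Pre_dayRange days) := by
  unfold Pre_dayRange; infer_instance

def pvWitness_dayRange : List Int := [0, 1, 2, 4, 6]

def Spec_dayRange (days : List Int) (out : String) : Prop := out = dayRange_alt days
instance (days : List Int) (out : String) : Decidable (Spec_dayRange days out) := by
  unfold Spec_dayRange; infer_instance

-- ===== CLAIM (what is proved, stated in full; the proofs are below) =====
def Claim_equal_dayRange : Prop :=
  ∀ (days : List Int), Dom_dayRange days → Pre_dayRange days → Spec_dayRange days (dayRange days)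

-- ===== LEMMAS AND PROOFS =====

-- proof-side view of how A's second loop renders one segment
def pvRender (seg : List Int) : String :=
  if seg.length > 1 then
    PySem.List.pyGetD pvDayNames (PySem.List.pyGetD seg 0 0) "" ++ "-"
      ++ PySem.List.pyGetD pvDayNames (PySem.List.pyGetD seg (-1) 0) ""
  else PySem.List.pyGetD pvDayNames (PySem.List.pyGetD seg 0 0) ""

-- A-side rendering of the run of days at index positions a..b (as Int positions)
def pvEmit (days : List Int) (a b : Int) : String :=
  if a = b then PySem.List.pyGetD pvDayNames (PySem.List.pyGetD days a 0) ""
  else PySem.List.pyGetD pvDayNames (PySem.List.pyGetD days a 0) "" ++ "-"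
       ++ PySem.List.pyGetD pvDayNames (PySem.List.pyGetD days b 0) ""

-- pvEmit expressed through B's fmt
theorem pvEmit_fmt (days : List Int) (a b : Int) (h : a ≤ b) :
    pvEmit days a b
      = pvFmt (PySem.List.pyGetD days a 0) (PySem.List.pyGetD days b 0) (decide (a < b)) := by
  by_cases hab : a = b
  · subst hab
    rw [pvEmit, if_pos rfl, pvFmt, if_neg (by simp)]
  · rw [pvEmit, if_neg hab, pvFmt, if_pos (by simp; omega)]

-- rendering the run of k ≥ 1 elements starting at index A is pvEmit of (A, A+k-1)
theorem pvRender_core (days : List Int) (A k : Nat) (h1 : 1 ≤ k) (h2 : A + k ≤ days.length) :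
    pvRender ((days.drop A).take k) = pvEmit days (A : Int) ((A : Int) + (k : Int) - 1) := by
  have hlen : ((days.drop A).take k).length = k := by
    simp [List.length_take, List.length_drop]; omega
  have hget0 : PySem.List.pyGetD ((days.drop A).take k) 0 0 = days[A]'(by omega) := by
    rw [PySem.List.pyGetD_zero]
    have h0 : ((days.drop A).take k).getD 0 0 = ((days.drop A).take k)[0]'(by omega) := by
      rw [List.getD_eq_getElem]
    rw [h0, List.getElem_take, List.getElem_drop]
    simp
  have hne : (days.drop A).take k ≠ [] := by
    intro h; rw [h] at hlen; simp at hlen; omega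
  have hgetlast : PySem.List.pyGetD ((days.drop A).take k) (-1) 0 = days[A + (k-1)]'(by omega) := by
    rw [PySem.List.pyGetD_neg_one _ _ hne, List.getLast_eq_getElem]
    simp only [hlen]
    rw [List.getElem_take, List.getElem_drop]
  have hdA : PySem.List.pyGetD days (A : Int) 0 = days[A]'(by omega) := by
    rw [PySem.List.pyGetD_eq_getElem days 0 (by omega) (by omega)]
    simp only [show ((A : Int)).toNat = A from by omega]
  have hdL : PySem.List.pyGetD days ((A : Int) + (k : Int) - 1) 0 = days[A + (k-1)]'(by omega) := by
    rw [PySem.List.pyGetD_eq_getElem days 0 (by omega) (by omega)]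
    simp only [show ((A : Int) + (k : Int) - 1).toNat = A + (k - 1) from by omega]
  by_cases hk : k = 1
  · subst hk
    rw [pvRender, if_neg (by omega), pvEmit, if_pos (by omega), hget0, hdA]
  · rw [pvRender, if_pos (by omega), pvEmit, if_neg (by omega), hget0, hgetlast, hdA, hdL]

theorem pvRender_slice (days : List Int) (a b : Int) (h0 : 0 ≤ a) (hab : a < b)
    (hb : b ≤ (days.length : Int)) :
    pvRender (PySem.List.slice days (some a) (some b)) = pvEmit days a (b - 1) := by
  rw [PySem.List.slice_toNat days h0 (by omega),
      pvRender_core days a.toNat (b.toNat - a.toNat) (by omega) (by omega)]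
  congr 1 <;> omega

theorem pvRender_drop (days : List Int) (a : Int) (h0 : 0 ≤ a)
    (ha : a ≤ (days.length : Int) - 1) :
    pvRender (PySem.List.slice days (some a) none) = pvEmit days a ((days.length : Int) - 1) := by
  rw [PySem.List.slice_from days h0]
  have htake : days.drop a.toNat = (days.drop a.toNat).take (days.length - a.toNat) := by
    rw [List.take_of_length_le]
    simp [List.length_drop]
  rw [htake, pvRender_core days a.toNat (days.length - a.toNat) (by omega) (by omega)]
  congr 1 <;> omega

theorem pvJoin_cons_cons (p q : String) (l : List String) :
    PySem.Str.join "," (p :: q :: l) = p ++ "," ++ PySem.Str.join "," (q :: l) := by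
  apply String.toList_inj.mp
  simp [PySem.Str.toList_join, PySem.Chars.join_cons_cons]

theorem pvJoin_singleton (x : String) : PySem.Str.join "," [x] = x := by
  apply String.toList_inj.mp
  simp [PySem.Str.toList_join, PySem.Chars.join_singleton]

-- join over a list with one extra element at the end
theorem pvJoin_append_singleton (l : List String) (x : String) (h : l ≠ []) :
    PySem.Str.join "," (l ++ [x]) = PySem.Str.join "," l ++ "," ++ x := by
  induction l with
  | nil => exact absurd rfl h
  | cons a l ih =>
    cases l with
    | nil =>
      rw [List.cons_append, List.nil_append, pvJoin_cons_cons, pvJoin_singleton, pvJoin_singleton]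
    | cons b t =>
      have hih := ih (by simp)
      rw [List.cons_append] at hih
      refine Eq.trans (pvJoin_cons_cons a b (t ++ [x])) ?_
      rw [hih, pvJoin_cons_cons a b t]
      apply String.toList_inj.mp
      simp

theorem pvJoin_glue (p q : String) (l : List String) :
    PySem.Str.join "," ((p ++ "," ++ q) :: l) = p ++ "," ++ PySem.Str.join "," (q :: l) := by
  cases l with
  | nil =>
    apply String.toList_inj.mp
    simp [PySem.Str.toList_join, PySem.Chars.join_singleton]
  | cons r l =>
    apply String.toList_inj.mp
    simp [PySem.Str.toList_join, PySem.Chars.join_cons_cons]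

theorem pvJoin_foldl (l : List String) : ∀ (p : String),
    l.foldl (fun acc s => acc ++ "," ++ s) p = PySem.Str.join "," (p :: l) := by
  induction l with
  | nil => intro p; exact (pvJoin_singleton p).symm
  | cons q l ih =>
    intro p
    rw [List.foldl_cons, ih]
    exact (pvJoin_glue p q l).trans (pvJoin_cons_cons p q l).symm

theorem pvFold_render_tail (segs : List (List Int)) : ∀ (r : String),
    (segs.foldl
        (fun (st : String × String) seg =>
          if seg.length > 1 then
            (st.1 ++ (st.2 ++ PySem.List.pyGetD pvDayNames (PySem.List.pyGetD seg 0 0) "" ++ "-"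
                           ++ PySem.List.pyGetD pvDayNames (PySem.List.pyGetD seg (-1) 0) ""), ",")
          else
            (st.1 ++ (st.2 ++ PySem.List.pyGetD pvDayNames (PySem.List.pyGetD seg 0 0) ""), ","))
        (r, ",")).1
      = (segs.map pvRender).foldl (fun acc s => acc ++ "," ++ s) r := by
  induction segs with
  | nil => intro r; simp
  | cons seg segs ih =>
    intro r
    rw [List.foldl_cons, List.map_cons, List.foldl_cons]
    split_ifs with h
    · rw [ih]; congr 1
      apply String.toList_inj.mp
      simp [pvRender, h, String.append_assoc]
    · rw [ih]; congr 1
      apply String.toList_inj.mp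
      simp [pvRender, h, String.append_assoc]

-- A's second loop is the ','-join of the rendered segments
theorem pvFold_render (seg0 : List Int) (segs : List (List Int)) :
    ((seg0 :: segs).foldl
        (fun (st : String × String) seg =>
          if seg.length > 1 then
            (st.1 ++ (st.2 ++ PySem.List.pyGetD pvDayNames (PySem.List.pyGetD seg 0 0) "" ++ "-"
                           ++ PySem.List.pyGetD pvDayNames (PySem.List.pyGetD seg (-1) 0) ""), ",")
          else
            (st.1 ++ (st.2 ++ PySem.List.pyGetD pvDayNames (PySem.List.pyGetD seg 0 0) ""), ","))
        ("", "")).1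
      = PySem.Str.join "," ((seg0 :: segs).map pvRender) := by
  rw [List.foldl_cons, List.map_cons]
  split_ifs with h
  · rw [pvFold_render_tail, pvJoin_foldl]
    congr 2
    apply String.toList_inj.mp
    simp [pvRender, h]
  · rw [pvFold_render_tail, pvJoin_foldl]
    congr 2
    apply String.toList_inj.mp
    simp [pvRender, h]

-- the common recursive description of the answer on the prefix 0..i of days:
-- the run containing position i is displayed with end value 'endv' and flag 'multi'
def pvPre (days : List Int) : Nat → Int → Bool → String
  | 0, endv, multi => pvFmt (PySem.List.pyGetD days 0 0) endv multi
  | (i+1), endv, multi =>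
      if PySem.List.pyGetD days ((i : Int) + 1) 0 - PySem.List.pyGetD days (i : Int) 0 > 1 then
        pvPre days i (PySem.List.pyGetD days (i : Int) 0) false ++ "," ++
          pvFmt (PySem.List.pyGetD days ((i : Int) + 1) 0) endv multi
      else pvPre days i endv true

-- ===== B side: the backward loop computes pvPre =====
theorem pvB_loop (days : List Int) : ∀ (i : Nat) (endv : Int) (multi : Bool) (res : String),
    pvFmt (PySem.List.pyGetD days 0 0)
        ((PySem.List.pyRange (i : Int) 0 (-1)).foldl
          (fun (st : String × Int × Bool) j =>
            if PySem.List.pyGetD days j 0 - PySem.List.pyGetD days (j - 1) 0 > 1 then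
              ("," ++ pvFmt (PySem.List.pyGetD days j 0) st.2.1 st.2.2 ++ st.1,
               PySem.List.pyGetD days (j - 1) 0, false)
            else (st.1, st.2.1, true))
          (res, endv, multi)).2.1
        ((PySem.List.pyRange (i : Int) 0 (-1)).foldl
          (fun (st : String × Int × Bool) j =>
            if PySem.List.pyGetD days j 0 - PySem.List.pyGetD days (j - 1) 0 > 1 then
              ("," ++ pvFmt (PySem.List.pyGetD days j 0) st.2.1 st.2.2 ++ st.1,
               PySem.List.pyGetD days (j - 1) 0, false)
            else (st.1, st.2.1, true))
          (res, endv, multi)).2.2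
      ++ ((PySem.List.pyRange (i : Int) 0 (-1)).foldl
          (fun (st : String × Int × Bool) j =>
            if PySem.List.pyGetD days j 0 - PySem.List.pyGetD days (j - 1) 0 > 1 then
              ("," ++ pvFmt (PySem.List.pyGetD days j 0) st.2.1 st.2.2 ++ st.1,
               PySem.List.pyGetD days (j - 1) 0, false)
            else (st.1, st.2.1, true))
          (res, endv, multi)).1
      = pvPre days i endv multi ++ res := by
  intro i
  induction i with
  | zero =>
    intro endv multi res
    rw [PySem.List.pyRange_neg_one_eq_nil (by omega)]
    simp only [List.foldl_nil]
    rfl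
  | succ i ih =>
    intro endv multi res
    rw [show ((i + 1 : Nat) : Int) = (i : Int) + 1 from by push_cast; ring,
        PySem.List.pyRange_neg_one_cons (by omega)]
    simp only [List.foldl_cons, show (i : Int) + 1 - 1 = (i : Int) from by ring]
    by_cases h : PySem.List.pyGetD days ((i : Int) + 1) 0 - PySem.List.pyGetD days (i : Int) 0 > 1
    · rw [if_pos h, ih]
      simp only [pvPre]
      rw [if_pos h]
      apply String.toList_inj.mp
      simp
    · rw [if_neg h, ih]
      simp only [pvPre]
      rw [if_neg h]

-- ===== A side: the forward segment collection also computes pvPre =====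
theorem pvA_loop (days : List Int) : ∀ (i : Nat), i + 1 ≤ days.length →
    ∃ last : Int, 0 ≤ last ∧ last ≤ (i : Int) ∧
      ((PySem.List.pyRange 0 (i : Int) 1).foldl
          (fun (st : List (List Int) × Int) j =>
            if PySem.List.pyGetD days (j + 1) 0 - PySem.List.pyGetD days j 0 > 1 then
              (st.1 ++ [PySem.List.slice days (some st.2) (some (j + 1))], j + 1)
            else st)
          ([], 0)).2 = last ∧
      ∀ (endv : Int) (multi : Bool),
        pvPre days i endv multi
          = PySem.Str.join ","
              (((PySem.List.pyRange 0 (i : Int) 1).foldl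
                  (fun (st : List (List Int) × Int) j =>
                    if PySem.List.pyGetD days (j + 1) 0 - PySem.List.pyGetD days j 0 > 1 then
                      (st.1 ++ [PySem.List.slice days (some st.2) (some (j + 1))], j + 1)
                    else st)
                  ([], 0)).1.map pvRender
               ++ [pvFmt (PySem.List.pyGetD days last 0) endv (multi || decide (last < (i : Int)))]) := by
  intro i
  induction i with
  | zero =>
    intro _
    refine ⟨0, le_rfl, le_rfl, ?_, ?_⟩
    · rw [PySem.List.pyRange_one_eq_nil (by omega)]; rfl
    · intro endv multi
      rw [PySem.List.pyRange_one_eq_nil (by omega)]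
      simp only [List.foldl_nil, List.map_nil, List.nil_append]
      rw [pvJoin_singleton, pvPre]
      simp
  | succ i ih =>
    intro hlen
    obtain ⟨last, h0, h1, h2, h3⟩ := ih (by omega)
    have hsplit : PySem.List.pyRange 0 ((i + 1 : Nat) : Int) 1
        = PySem.List.pyRange 0 (i : Int) 1 ++ [(i : Int)] := by
      have : ((i + 1 : Nat) : Int) = (i : Int) + 1 := by push_cast; ring
      rw [this, PySem.List.pyRange_one_succ_right (by omega)]
    rw [hsplit, List.foldl_append, List.foldl_cons, List.foldl_nil]
    by_cases h : PySem.List.pyGetD days ((i : Int) + 1) 0 - PySem.List.pyGetD days (i : Int) 0 > 1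
    · simp only [if_pos h, h2]
      refine ⟨(i : Int) + 1, by omega, by push_cast; omega, rfl, ?_⟩
      intro endv multi
      have hr : pvRender (PySem.List.slice days (some last) (some ((i : Int) + 1)))
          = pvFmt (PySem.List.pyGetD days last 0) (PySem.List.pyGetD days (i : Int) 0)
              (false || decide (last < (i : Int))) := by
        rw [pvRender_slice days last ((i : Int) + 1) h0 (by omega) (by omega)]
        have he : (i : Int) + 1 - 1 = (i : Int) := by ring
        rw [he, pvEmit_fmt days last (i : Int) h1]
        simp
      simp only [pvPre]
      rw [if_pos h, h3 (PySem.List.pyGetD days (i : Int) 0) false, ← hr, List.map_append,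
          List.map_cons, List.map_nil,
          show ((i + 1 : Nat) : Int) = (i : Int) + 1 from by push_cast; ring]
      simp only [lt_self_iff_false, decide_false, Bool.or_false]
      conv_rhs => rw [pvJoin_append_singleton _ _ (by simp)]
    · simp only [if_neg h, h2]
      refine ⟨last, h0, by push_cast; omega, rfl, ?_⟩
      intro endv multi
      simp only [pvPre]
      rw [if_neg h, h3 endv true]
      have hd : decide (last < ((i + 1 : Nat) : Int)) = true :=
        decide_eq_true (by omega)
      rw [hd, Bool.or_true, Bool.true_or]

-- assembling A's result: render pass on S ++ [days[L:]] vs join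
theorem pvFinal (days : List Int) (S : List (List Int)) (L : Int) (h0 : 0 ≤ L)
    (h1 : L ≤ (days.length : Int) - 1) :
    ((S ++ [PySem.List.slice days (some L) none]).foldl
        (fun (st : String × String) seg =>
          if seg.length > 1 then
            (st.1 ++ (st.2 ++ PySem.List.pyGetD pvDayNames (PySem.List.pyGetD seg 0 0) "" ++ "-"
                           ++ PySem.List.pyGetD pvDayNames (PySem.List.pyGetD seg (-1) 0) ""), ",")
          else
            (st.1 ++ (st.2 ++ PySem.List.pyGetD pvDayNames (PySem.List.pyGetD seg 0 0) ""), ","))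
        ("", "")).1
      = PySem.Str.join "," (S.map pvRender ++ [pvEmit days L ((days.length : Int) - 1)]) := by
  have hdrop := pvRender_drop days L h0 h1
  cases S with
  | nil =>
    rw [List.nil_append, pvFold_render]
    simp only [List.map_cons, List.map_nil, List.nil_append]
    rw [hdrop]
  | cons s t =>
    rw [List.cons_append, pvFold_render]
    simp only [List.map_cons, List.map_append, List.map_nil]
    rw [hdrop, List.cons_append]

-- ===== VERDICT (by name: the statement is the Claim_ definition above) =====
theorem dayRange_spec : Claim_equal_dayRange := by
  intro days _ _
  unfold Spec_dayRange
  by_cases hnil : days = []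
  · subst hnil; rfl
  · have hlen : 1 ≤ days.length := by
      cases days with
      | nil => exact absurd rfl hnil
      | cons x xs => simp
    have hcast : ((days.length - 1 : Nat) : Int) = (days.length : Int) - 1 := by omega
    -- B = pvPre (n-1) days[n-1] false
    have hB : dayRange_alt days
        = pvPre days (days.length - 1) (PySem.List.pyGetD days (-1) 0) false := by
      rw [dayRange_alt, if_neg hnil]
      simp only []
      rw [← hcast, pvB_loop days (days.length - 1) (PySem.List.pyGetD days (-1) 0) false ""]
      apply String.toList_inj.mp
      simp
    -- A = pvPre (n-1) days[n-1] false
    obtain ⟨last, h0, h1, h2, h3⟩ := pvA_loop days (days.length - 1) (by omega)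
    rw [hcast] at h1 h2 h3
    have hlast : PySem.List.pyGetD days (-1) 0
        = PySem.List.pyGetD days ((days.length : Int) - 1) 0 := by
      rw [PySem.List.pyGetD_neg_one days 0 hnil,
          PySem.List.pyGetD_eq_getElem days 0 (by omega) (by omega)]
      rw [List.getLast_eq_getElem]
      congr 1
      omega
    have hA : dayRange days
        = pvPre days (days.length - 1) (PySem.List.pyGetD days ((days.length : Int) - 1) 0) false := by
      rw [dayRange, if_neg hnil]
      simp only []
      rw [pvFinal days _ _ (h2 ▸ h0) (h2 ▸ h1)]
      rw [h3 (PySem.List.pyGetD days ((days.length : Int) - 1) 0) false]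
      rw [h2, pvEmit_fmt days last ((days.length : Int) - 1) h1]
      simp
    rw [hA, hB, hlast]
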